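-- pv_equiv track=rewrite | github.com/SkipPharaoh/python-challenge-problems-purple | day4/day4-solutions.py | fuzz_bizz
-- ===== SOURCE A (Python) =====
-- def fuzz_bizz(max):
--     newList = []
--     for i in range(max):
--         if i % 2 == 0 and i % 7 != 0:
--             newList.append(i)
--         elif i % 7 == 0 and i % 2 != 0:
--             newList.append(i)
--     return newList
-- ===== SOURCE B (Python) =====
-- def fuzz_bizz(max):
--     evens = set(range(0, max, 2))
--     mult7 = set(range(0, max, 7))
--     return sorted(evens ^ mult7)
-- ===== Notes on version B (the rewrite author's own statement) =====
-- stated objective: alternative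
-- what changed: Replaces the per-integer modulo scan with direct generation of the two residue classes as stepped ranges and returns the sorted symmetric difference of the two sets.
import Mathlib
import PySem

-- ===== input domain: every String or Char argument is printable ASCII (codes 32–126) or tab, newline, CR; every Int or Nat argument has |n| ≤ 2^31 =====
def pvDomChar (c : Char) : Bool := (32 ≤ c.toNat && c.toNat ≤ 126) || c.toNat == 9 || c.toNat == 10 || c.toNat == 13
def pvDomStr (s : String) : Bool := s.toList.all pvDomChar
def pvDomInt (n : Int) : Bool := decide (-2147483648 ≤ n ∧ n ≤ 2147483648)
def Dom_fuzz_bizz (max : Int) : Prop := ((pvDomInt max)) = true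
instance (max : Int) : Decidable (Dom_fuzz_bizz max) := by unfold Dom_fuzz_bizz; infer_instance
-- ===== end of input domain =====

-- B replaces A's per-integer modulo scan with the sorted symmetric difference of the two residue classes generated as stepped ranges (alternative decomposition, not claimed faster).


-- ===== PORT A =====
def fuzz_bizz (max : Int) : List Int :=
  (PySem.List.pyRange 0 max 1).foldl (fun newList i =>
    if PySem.Int.mod i 2 = 0 ∧ PySem.Int.mod i 7 ≠ 0 then newList ++ [i]
    else if PySem.Int.mod i 7 = 0 ∧ PySem.Int.mod i 2 ≠ 0 then newList ++ [i]
    else newList) []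

-- ===== PORT B =====
def fuzz_bizz_alt (max : Int) : List Int :=
  let evens : PySem.Set Int := PySem.Set.ofList (PySem.List.pyRange 0 max 2)
  let mult7 : PySem.Set Int := PySem.Set.ofList (PySem.List.pyRange 0 max 7)
  PySem.List.sorted (PySem.Set.symmDiff evens mult7) (fun x => x) false

-- ===== PRECONDITION & SPEC =====
def Spec_fuzz_bizz (max : Int) (out : List Int) : Prop := out = fuzz_bizz_alt max
instance (max : Int) (out : List Int) : Decidable (Spec_fuzz_bizz max out) := by unfold Spec_fuzz_bizz; infer_instance

-- ===== CLAIM (what is proved, stated in full; the proofs are below) =====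
def Claim_equal_fuzz_bizz : Prop := ∀ (max : Int), Dom_fuzz_bizz max → Spec_fuzz_bizz max (fuzz_bizz max)

-- ===== LEMMAS AND PROOFS =====

-- the combined test of A's two appending branches, as one Bool
def fbCond (i : Int) : Bool :=
  (decide (PySem.Int.mod i 2 = 0) && !decide (PySem.Int.mod i 7 = 0)) ||
  (decide (PySem.Int.mod i 7 = 0) && !decide (PySem.Int.mod i 2 = 0))

theorem fuzz_bizz_eq_filter (max : Int) :
    fuzz_bizz max = (PySem.List.pyRange 0 max 1).filter fbCond := by
  unfold fuzz_bizz
  have hf : (fun (newList : List Int) (i : Int) =>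
      if PySem.Int.mod i 2 = 0 ∧ PySem.Int.mod i 7 ≠ 0 then newList ++ [i]
      else if PySem.Int.mod i 7 = 0 ∧ PySem.Int.mod i 2 ≠ 0 then newList ++ [i]
      else newList)
      = (fun (acc : List Int) (x : Int) => if fbCond x then acc ++ [id x] else acc) := by
    funext acc x
    simp only [fbCond, id]
    split_ifs with h1 h2 h3 h3 <;> simp_all
    omega
  rw [hf, PySem.List.foldl_append_if fbCond id]
  simp [List.map_id]

theorem mem_fuzz_bizz (max x : Int) :
    x ∈ fuzz_bizz max ↔ (0 ≤ x ∧ x < max) ∧ fbCond x = true := by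
  rw [fuzz_bizz_eq_filter]
  simp [List.mem_filter, PySem.List.mem_pyRange_one, and_assoc]

-- ===== VERDICT (by name: the statement is the Claim_ definition above) =====
theorem fuzz_bizz_spec : Claim_equal_fuzz_bizz := by
  intro max _
  show fuzz_bizz max = fuzz_bizz_alt max
  unfold fuzz_bizz_alt
  refine (PySem.List.sorted_eq_of_perm_of_pairwise_lt _ _ (fun x => x) ?_ ?_).symm
  · rw [List.perm_ext_iff_of_nodup]
    · intro x
      rw [mem_fuzz_bizz, PySem.Set.mem_symmDiff]
      simp only [PySem.Set.mem_ofList,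
        PySem.List.mem_pyRange_iff_of_pos (by norm_num : (0:Int) < 2),
        PySem.List.mem_pyRange_iff_of_pos (by norm_num : (0:Int) < 7),
        fbCond, Int.sub_zero, Bool.or_eq_true, Bool.and_eq_true, decide_eq_true_eq,
        Bool.not_eq_eq_eq_not, Bool.not_true, decide_eq_false_iff_not,
        PySem.Int.mod_eq_zero_iff_dvd]
      tauto
    · rw [fuzz_bizz_eq_filter]
      exact List.filter_sublist.nodup (PySem.List.nodup_pyRange_one 0 max)
    · exact PySem.Set.nodup_symmDiff _ _ (PySem.Set.nodup_ofList _) (PySem.Set.nodup_ofList _)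
  · rw [fuzz_bizz_eq_filter]
    exact (PySem.List.pairwise_lt_pyRange_one 0 max).sublist List.filter_sublist
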